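-- pv_equiv track=rewrite | github.com/leonhx/leetcode-practice | 44.wildcard-matching.py | _parse
-- ===== SOURCE A (Python) =====
-- from typing import List
--
-- def _parse(p: str) -> List[str]:
--     i, ps = 0, []
--     while i < len(p):
--         if p[i] == '*':
--             ps.append('*')
--             while i < len(p) and p[i] == '*':
--                 i += 1
--         elif p[i] == '?':
--             j = i + 1
--             while j < len(p) and p[j] == '?':
--                 j += 1
--             ps.append(p[i:j])
--             i = j
--         else:
--             j = i + 1
--             while j < len(p) and p[j] != '*' and p[j] != '?':
--                 j += 1
--             ps.append(p[i:j])
--             i = j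
--     return ps
-- ===== SOURCE B (Python) =====
-- from typing import List
--
-- def _parse(p: str) -> List[str]:
--     ps, kind = [], None
--     for c in p:
--         k = c if c in '*?' else ''
--         if k != kind:
--             ps.append(c)
--             kind = k
--         elif k != '*':
--             ps[-1] += c
--         # consecutive '*' are skipped
--     return ps
-- ===== Notes on version B (the rewrite author's own statement) =====
-- stated objective: simpler
-- what changed: Replaces the index-based state machine with nested run-scanning while-loops by a single character-by-character pass that tracks the kind of the last emitted token and either starts a new token, extends it, or skips repeated stars.
import Mathlib
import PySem

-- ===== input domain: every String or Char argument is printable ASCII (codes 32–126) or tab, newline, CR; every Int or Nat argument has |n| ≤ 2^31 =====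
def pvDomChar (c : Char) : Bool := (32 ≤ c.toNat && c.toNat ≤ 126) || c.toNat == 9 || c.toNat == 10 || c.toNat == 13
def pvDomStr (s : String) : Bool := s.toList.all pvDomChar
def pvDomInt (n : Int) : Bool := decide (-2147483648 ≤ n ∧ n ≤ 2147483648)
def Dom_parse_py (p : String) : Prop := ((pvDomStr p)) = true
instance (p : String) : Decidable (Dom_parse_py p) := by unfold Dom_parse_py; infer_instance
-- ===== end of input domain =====

-- B replaces A's index-based state machine (nested run-scanning while loops) by a single
-- character-by-character fold that remembers the kind of the last token (objective: simpler).

-- ===== PORT A =====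
-- A scans with index i; each branch's inner while-loop advances j over a run and slices p[i:j].
-- Ported over List Char: the inner scanning loops are takeWhile/dropWhile of the same predicates.
def parseA_go : List Char → List (List Char)
  | [] => []
  | c :: cs =>
    if c = '*' then
      ['*'] :: parseA_go (cs.dropWhile (fun d => d = '*'))
    else if c = '?' then
      (c :: cs.takeWhile (fun d => d = '?')) :: parseA_go (cs.dropWhile (fun d => d = '?'))
    else
      (c :: cs.takeWhile (fun d => d ≠ '*' && d ≠ '?')) ::
        parseA_go (cs.dropWhile (fun d => d ≠ '*' && d ≠ '?'))
termination_by cs => cs.length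
decreasing_by
  all_goals simp only [List.length_cons]
  all_goals exact Nat.lt_succ_of_le (List.length_dropWhile_le _ _)

def parse_py (p : String) : List String :=
  (parseA_go p.toList).map (fun l => String.mk l)

-- ===== PORT B =====
-- key of a character: '*' and '?' are their own kind, any other character has kind "" (literal)
def pvKey (c : Char) : List Char := if c = '*' || c = '?' then [c] else []

def stepB (st : List (List Char) × Option (List Char)) (c : Char) :
    List (List Char) × Option (List Char) :=
  let k := pvKey c
  if st.2 ≠ some k then (st.1 ++ [[c]], some k)          -- new token
  else if k ≠ ['*'] then                                  -- ps[-1] += c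
    (st.1.dropLast ++ [(st.1.getLast?.getD []) ++ [c]], st.2)
  else st                                                 -- repeated '*': skip

def parse_py_alt (p : String) : List String :=
  ((p.toList.foldl stepB ([], none)).1).map (fun l => String.mk l)

-- ===== PRECONDITION & SPEC =====
def Spec_parse_py (p : String) (out : List String) : Prop := out = parse_py_alt p
instance (p : String) (out : List String) : Decidable (Spec_parse_py p out) := by unfold Spec_parse_py; infer_instance

-- ===== CLAIM (what is proved, stated in full; the proofs are below) =====
def Claim_equal_parse_py : Prop := ∀ (p : String), Dom_parse_py p → Spec_parse_py p (parse_py p)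

-- ===== LEMMAS AND PROOFS =====

-- a run of repeated '*' leaves the state unchanged
theorem skip_run (t : List Char) (h : ∀ d ∈ t, d = '*') (ps : List (List Char)) :
    t.foldl stepB (ps, some ['*']) = (ps, some ['*']) := by
  induction t with
  | nil => rfl
  | cons d t ih =>
    have hd : d = '*' := h d (by simp)
    simp only [List.foldl_cons]
    rw [show stepB (ps, some ['*']) d = (ps, some ['*']) by
      simp [stepB, pvKey, hd]]
    exact ih (fun x hx => h x (by simp [hx]))

-- a run of same-kind non-star characters is absorbed into the last token
theorem merge_run (k : List Char) (hk : k ≠ ['*']) (t : List Char)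
    (h : ∀ d ∈ t, pvKey d = k) :
    ∀ (ps : List (List Char)) (seg : List Char),
      t.foldl stepB (ps ++ [seg], some k) = (ps ++ [seg ++ t], some k) := by
  induction t with
  | nil => simp
  | cons d t ih =>
    intro ps seg
    have hd : pvKey d = k := h d (by simp)
    simp only [List.foldl_cons]
    rw [show stepB (ps ++ [seg], some k) d = (ps ++ [seg ++ [d]], some k) by
      simp [stepB, hd, hk]]
    rw [ih (fun x hx => h x (by simp [hx])) ps (seg ++ [d])]
    simp

-- the head of a dropWhile does not satisfy the predicate
theorem head_dropWhile_not {p : Char → Bool} :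
    ∀ (l : List Char) (c : Char), (l.dropWhile p).head? = some c → p c = false := by
  intro l c h
  induction l with
  | nil => simp [List.dropWhile] at h
  | cons d t ih =>
    by_cases hp : p d = true
    · rw [List.dropWhile_cons_of_pos hp] at h; exact ih h
    · rw [List.dropWhile_cons_of_neg hp] at h
      simp at h
      subst h
      exact Bool.eq_false_iff.mpr hp

theorem main_invariant :
    ∀ (cs : List Char) (ps : List (List Char)) (kind : Option (List Char)),
      (∀ c, cs.head? = some c → kind ≠ some (pvKey c)) →
      (cs.foldl stepB (ps, kind)).1 = ps ++ parseA_go cs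
  | [], ps, kind, _ => by simp [parseA_go]
  | c :: cs, ps, kind, h => by
    have hfresh : kind ≠ some (pvKey c) := h c rfl
    simp only [List.foldl_cons]
    rw [show stepB (ps, kind) c = (ps ++ [[c]], some (pvKey c)) by
      simp [stepB, hfresh]]
    by_cases hstar : c = '*'
    · subst hstar
      rw [show pvKey '*' = ['*'] from rfl]
      conv_lhs =>
        rw [← List.takeWhile_append_dropWhile (p := fun d => d = '*') (l := cs)]
      rw [List.foldl_append]
      rw [skip_run (cs.takeWhile (fun d => d = '*'))
        (fun d hd => by simpa using List.mem_takeWhile_imp hd) (ps ++ [['*']])]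
      rw [main_invariant (cs.dropWhile (fun d => d = '*')) (ps ++ [['*']]) (some ['*'])
        (fun c hc => by
          have hne := head_dropWhile_not _ _ hc
          simp at hne
          by_cases hq : c = '?' <;> simp [pvKey, hq, hne])]
      simp [parseA_go]
    · by_cases hq : c = '?'
      · subst hq
        rw [show pvKey '?' = ['?'] from rfl]
        conv_lhs =>
          rw [← List.takeWhile_append_dropWhile (p := fun d => d = '?') (l := cs)]
        rw [List.foldl_append]
        rw [merge_run ['?'] (by decide) (cs.takeWhile (fun d => d = '?'))
          (fun d hd => by
            have := List.mem_takeWhile_imp hd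
            simp at this
            simp [pvKey, this]) ps ['?']]
        rw [main_invariant (cs.dropWhile (fun d => d = '?'))
          (ps ++ [['?'] ++ cs.takeWhile (fun d => d = '?')]) (some ['?'])
          (fun c hc => by
            have hne := head_dropWhile_not _ _ hc
            simp at hne
            by_cases hs : c = '*' <;> simp [pvKey, hs, hne])]
        simp [parseA_go]
      · rw [show pvKey c = [] by simp [pvKey, hstar, hq]]
        conv_lhs =>
          rw [← List.takeWhile_append_dropWhile (p := fun d => d ≠ '*' && d ≠ '?') (l := cs)]
        rw [List.foldl_append]
        rw [merge_run [] (by decide) (cs.takeWhile (fun d => d ≠ '*' && d ≠ '?'))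
          (fun d hd => by
            have := List.mem_takeWhile_imp hd
            simp at this
            simp [pvKey, this.1, this.2]) ps [c]]
        rw [main_invariant (cs.dropWhile (fun d => d ≠ '*' && d ≠ '?'))
          (ps ++ [[c] ++ cs.takeWhile (fun d => d ≠ '*' && d ≠ '?')]) (some [])
          (fun c hc => by
            have hne := head_dropWhile_not _ _ hc
            simp at hne
            by_cases hs : c = '*' <;> simp [pvKey, hs, hne])]
        simp [parseA_go, hstar, hq]
termination_by cs => cs.length
decreasing_by
  all_goals simp only [List.length_cons]
  all_goals exact Nat.lt_succ_of_le (List.length_dropWhile_le _ _)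

-- ===== VERDICT (by name: the statement is the Claim_ definition above) =====
theorem parse_py_spec : Claim_equal_parse_py := by
  intro p _
  unfold Spec_parse_py parse_py parse_py_alt
  rw [main_invariant p.toList [] none (fun _ _ => by simp)]
  simp
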